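-- pv_equiv track=rewrite | github.com/strzebon/concurrency | gaussian_elimination/solution/main.py | dependency_relationship
-- ===== SOURCE A (Python) =====
-- def dependency_relationship(A, T, n):
--     D = set()
--     for i in range(n):
--         x = T[i][0]
--         for j in range(n):
--             if i == j:
--                 D.add((A[i], A[i]))
--             elif x == T[j][0] or x in T[j][1]:
--                 D.add((A[i], A[j]))
--                 D.add((A[j], A[i]))
--     I = {(x, y) for x in A for y in A}
--     I = sorted(I - D)
--     D = sorted(D)
--
--     return D, I
-- ===== SOURCE B (Python) =====
-- def dependency_relationship(A, T, n):
--     # index the ops: writes[v] = ops writing v, reads[v] = ops reading v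
--     writes = {}
--     reads = {}
--     for j in range(n):
--         writes.setdefault(T[j][0], []).append(j)
--         for v in T[j][1]:
--             reads.setdefault(v, []).append(j)
--     D = set()
--     for i in range(n):
--         v = T[i][0]
--         D.add((A[i], A[i]))
--         for j in writes[v]:
--             D.add((A[i], A[j]))
--             D.add((A[j], A[i]))
--         for j in reads.get(v, []):
--             D.add((A[i], A[j]))
--             D.add((A[j], A[i]))
--     I = sorted({(x, y) for x in A for y in A} - D)
--     return sorted(D), I
-- ===== Notes on version B (the rewrite author's own statement) =====
-- stated objective: alternative
-- what changed: Replaces A's quadratic double loop with its inner read-list membership scan per pair by two precomputed indices (write-map and read-map: variable -> list of op indices), emitting the dependent pairs directly per group; the D-construction drops from O(n^2*r) to output-sensitive, but the complement set I is Theta(n^2) in both, so total cost is unchanged.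
import Mathlib
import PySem

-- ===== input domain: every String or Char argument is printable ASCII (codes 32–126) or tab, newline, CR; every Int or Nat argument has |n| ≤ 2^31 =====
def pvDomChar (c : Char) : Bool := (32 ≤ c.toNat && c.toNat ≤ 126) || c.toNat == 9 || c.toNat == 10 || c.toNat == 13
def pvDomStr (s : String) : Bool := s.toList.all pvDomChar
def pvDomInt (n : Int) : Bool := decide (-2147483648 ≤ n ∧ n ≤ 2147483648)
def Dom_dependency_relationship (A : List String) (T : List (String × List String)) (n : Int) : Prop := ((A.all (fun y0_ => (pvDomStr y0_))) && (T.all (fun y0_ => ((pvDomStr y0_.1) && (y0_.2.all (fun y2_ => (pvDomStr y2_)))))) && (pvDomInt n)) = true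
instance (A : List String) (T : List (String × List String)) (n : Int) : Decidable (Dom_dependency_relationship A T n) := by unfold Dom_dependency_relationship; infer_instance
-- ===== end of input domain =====

-- B replaces A's quadratic double loop (with an inner read-list scan per pair) by two precomputed
-- indices (write-map and read-map: variable → op indices) and emits the dependent pairs per group;
-- objective: alternative (the complement set I is quadratic in both, so total cost is similar).

-- ===== PORT A =====
-- the set comprehension {(x, y) for x in A for y in A} (identical line in Source A and Source B)
def pvAllPairs (A : List String) : PySem.Set (String × String) :=
  A.foldl (fun s x => A.foldl (fun s y => PySem.Set.add s (x, y)) s) PySem.Set.empty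

-- A's nested i/j loop over range(n) building the set D; pyGetD is exact for the in-range
-- indices that Pre_ guarantees
def pvBuildA (A : List String) (T : List (String × List String)) (rng : List Int) : PySem.Set (String × String) :=
  rng.foldl (fun D i =>
    let x := (PySem.List.pyGetD T i ("", [])).1
    rng.foldl (fun D j =>
      if i = j then
        PySem.Set.add D (PySem.List.pyGetD A i "", PySem.List.pyGetD A i "")
      else if x = (PySem.List.pyGetD T j ("", [])).1 ∨ (PySem.List.pyGetD T j ("", [])).2.contains x then
        PySem.Set.add (PySem.Set.add D (PySem.List.pyGetD A i "", PySem.List.pyGetD A j ""))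
          (PySem.List.pyGetD A j "", PySem.List.pyGetD A i "")
      else D) D) PySem.Set.empty

def dependency_relationship (A : List String) (T : List (String × List String)) (n : Int) : (List (String × String)) × (List (String × String)) :=
  let rng := PySem.List.pyRange 0 n 1
  let D := pvBuildA A T rng
  let I := PySem.List.sorted2 (PySem.Set.diff (pvAllPairs A) D) Prod.fst Prod.snd
  (PySem.List.sorted2 D Prod.fst Prod.snd, I)

-- ===== PORT B =====
-- Source B's first loop: writes/reads maps; setdefault(..).append(j) = Dict.modify with default []
def pvBuildMaps (T : List (String × List String)) (rng : List Int) : PySem.Dict String (List Int) × PySem.Dict String (List Int) :=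
  rng.foldl (fun m j =>
    (PySem.Dict.modify m.1 (PySem.List.pyGetD T j ("", [])).1 [] (· ++ [j]),
     (PySem.List.pyGetD T j ("", [])).2.foldl (fun r v => PySem.Dict.modify r v [] (· ++ [j])) m.2))
    (PySem.Dict.empty, PySem.Dict.empty)

-- Source B's second loop: per op i, the diagonal pair, then both directions for the write group and
-- the read group of T[i][0]; writes[v] cannot raise KeyError (v was inserted at iteration i),
-- so it is ported as getD, like reads.get(v, [])
def pvBuildB (A : List String) (T : List (String × List String)) (rng : List Int) : PySem.Set (String × String) :=
  let maps := pvBuildMaps T rng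
  rng.foldl (fun D i =>
    let v := (PySem.List.pyGetD T i ("", [])).1
    let D := PySem.Set.add D (PySem.List.pyGetD A i "", PySem.List.pyGetD A i "")
    let D := (PySem.Dict.getD maps.1 v []).foldl (fun D j =>
        PySem.Set.add (PySem.Set.add D (PySem.List.pyGetD A i "", PySem.List.pyGetD A j ""))
          (PySem.List.pyGetD A j "", PySem.List.pyGetD A i "")) D
    (PySem.Dict.getD maps.2 v []).foldl (fun D j =>
        PySem.Set.add (PySem.Set.add D (PySem.List.pyGetD A i "", PySem.List.pyGetD A j ""))
          (PySem.List.pyGetD A j "", PySem.List.pyGetD A i "")) D) PySem.Set.empty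

def dependency_relationship_alt (A : List String) (T : List (String × List String)) (n : Int) : (List (String × String)) × (List (String × String)) :=
  let rng := PySem.List.pyRange 0 n 1
  let D := pvBuildB A T rng
  (PySem.List.sorted2 D Prod.fst Prod.snd,
   PySem.List.sorted2 (PySem.Set.diff (pvAllPairs A) D) Prod.fst Prod.snd)

-- ===== PRECONDITION & SPEC =====
-- Pre_: A indexes A[i] and T[i] for 0 ≤ i < n, so Python raises IndexError iff n exceeds either
-- length (negative n is fine: range(n) is empty).
def Pre_dependency_relationship (A : List String) (T : List (String × List String)) (n : Int) : Prop :=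
  n ≤ (A.length : Int) ∧ n ≤ (T.length : Int)
instance (A : List String) (T : List (String × List String)) (n : Int) : Decidable (Pre_dependency_relationship A T n) := by unfold Pre_dependency_relationship; infer_instance
def pvWitness_dependency_relationship : List String × (List (String × List String)) × Int :=
  (["a", "b", "c"], [("x", ["y"]), ("y", []), ("z", ["x"])], 3)
def Spec_dependency_relationship (A : List String) (T : List (String × List String)) (n : Int) (out : (List (String × String)) × (List (String × String))) : Prop := out = dependency_relationship_alt A T n
instance (A : List String) (T : List (String × List String)) (n : Int) (out : (List (String × String)) × (List (String × String))) : Decidable (Spec_dependency_relationship A T n out) := by unfold Spec_dependency_relationship; infer_instance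

-- ===== CLAIM (what is proved, stated in full; the proofs are below) =====
def Claim_equal_dependency_relationship : Prop := ∀ (A : List String) (T : List (String × List String)) (n : Int), Dom_dependency_relationship A T n → Pre_dependency_relationship A T n → Spec_dependency_relationship A T n (dependency_relationship A T n)

-- ===== LEMMAS AND PROOFS =====

-- proof-only accessors
def pvA (A : List String) (i : Int) : String := PySem.List.pyGetD A i ""
def pvW (T : List (String × List String)) (i : Int) : String := (PySem.List.pyGetD T i ("", [])).1
def pvR (T : List (String × List String)) (i : Int) : List String := (PySem.List.pyGetD T i ("", [])).2

-- the pairs A's (i, j) iteration puts into D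
def depCondA (A : List String) (T : List (String × List String)) (i j : Int) (x : String × String) : Prop :=
  (i = j ∧ x = (pvA A i, pvA A i)) ∨
  (¬ i = j ∧ (pvW T i = pvW T j ∨ pvW T i ∈ pvR T j) ∧
    (x = (pvA A i, pvA A j) ∨ x = (pvA A j, pvA A i)))

-- the pairs B's iteration over op i puts into D
def depCondB (A : List String) (T : List (String × List String)) (rng : List Int) (i : Int) (x : String × String) : Prop :=
  x = (pvA A i, pvA A i) ∨
  ∃ j, ((j ∈ rng ∧ pvW T j = pvW T i) ∨ (j ∈ rng ∧ pvW T i ∈ pvR T j)) ∧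
    (x = (pvA A i, pvA A j) ∨ x = (pvA A j, pvA A i))

-- generic: membership in a fold that only grows a list
theorem mem_foldl_grow {α β : Type} (f : List α → β → List α) (P : β → α → Prop)
    (hf : ∀ s b x, x ∈ f s b ↔ x ∈ s ∨ P b x) :
    ∀ (l : List β) (s : List α) (x : α), x ∈ l.foldl f s ↔ x ∈ s ∨ ∃ b ∈ l, P b x := by
  intro l
  induction l with
  | nil => simp
  | cons b t ih =>
    intro s x
    simp only [List.foldl_cons, ih, hf, List.mem_cons]
    constructor
    · rintro ((h | h) | ⟨c, hc, hp⟩)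
      · exact Or.inl h
      · exact Or.inr ⟨b, Or.inl rfl, h⟩
      · exact Or.inr ⟨c, Or.inr hc, hp⟩
    · rintro (h | ⟨c, (rfl | hc), hp⟩)
      · exact Or.inl (Or.inl h)
      · exact Or.inl (Or.inr hp)
      · exact Or.inr ⟨c, hc, hp⟩

theorem nodup_foldl_grow {α β : Type} (f : List α → β → List α)
    (hf : ∀ s b, s.Nodup → (f s b).Nodup) :
    ∀ (l : List β) (s : List α), s.Nodup → (l.foldl f s).Nodup := by
  intro l
  induction l with
  | nil => intro s h; simpa
  | cons b t ih => intro s h; exact ih _ (hf s b h)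

-- the lex comparator of sorted2 at identity keys is the Lex order on pairs
theorem comparator_eq :
    (fun (a b : String × String) => decide (Prod.fst a < Prod.fst b) || (!decide (Prod.fst b < Prod.fst a) && decide (Prod.snd a < Prod.snd b)))
      = fun a b => decide (toLex a < toLex b) := by
  funext a b
  by_cases h1 : a.1 < b.1
  · simp [h1, Prod.Lex.lt_iff]
  · by_cases h2 : b.1 < a.1
    · have hne : a.1 ≠ b.1 := ne_of_gt h2
      have : ¬ (toLex a < toLex b) := by
        rw [Prod.Lex.lt_iff]; rintro (h | ⟨he, -⟩)
        · exact h1 h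
        · exact hne he
      simp [h1, h2, this]
    · have he : a.1 = b.1 := le_antisymm (not_lt.mp h2) (not_lt.mp h1)
      by_cases h3 : a.2 < b.2 <;> simp [h3, Prod.Lex.lt_iff, he]

theorem pairwise_foldl_insertBy :
    ∀ (l acc : List (String × String)),
      acc.Pairwise (fun a b => toLex a ≤ toLex b) →
      (l.foldl (fun acc x => PySem.List.insertBy (fun a b => decide (toLex a < toLex b)) x acc) acc).Pairwise
        (fun a b => toLex a ≤ toLex b) := by
  intro l
  induction l with
  | nil => intro acc h; simpa
  | cons x t ih =>
    intro acc h
    exact ih _ (PySem.List.insertBy_pairwise_le (fun p => toLex p) x acc h)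

theorem sorted2_unfold (xs : List (String × String)) :
    PySem.List.sorted2 xs Prod.fst Prod.snd
      = xs.foldl (fun acc x => PySem.List.insertBy (fun a b => decide (toLex a < toLex b)) x acc) [] := by
  simp only [PySem.List.sorted2]
  rw [comparator_eq]
  rfl

theorem sorted2_id_eq_of_perm (xs ys : List (String × String)) (h : xs.Perm ys) :
    PySem.List.sorted2 xs Prod.fst Prod.snd = PySem.List.sorted2 ys Prod.fst Prod.snd := by
  apply PySem.List.eq_of_perm_of_pairwise_le_of_injective (fun p => toLex p) (fun a b hab => hab)
  · exact (PySem.List.sorted2_perm xs _ _ _).trans (h.trans (PySem.List.sorted2_perm ys _ _ _).symm)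
  · rw [sorted2_unfold]; exact pairwise_foldl_insertBy _ _ (by simp)
  · rw [sorted2_unfold]; exact pairwise_foldl_insertBy _ _ (by simp)

theorem foldl_pair_split {α β γ : Type} (f : α → γ → α) (g : β → γ → β) :
    ∀ (l : List γ) (a : α) (b : β),
      (l.foldl (fun m j => (f m.1 j, g m.2 j)) (a, b)) = (l.foldl f a, l.foldl g b) := by
  intro l
  induction l with
  | nil => intro a b; rfl
  | cons c t ih => intro a b; simp only [List.foldl_cons]; exact ih _ _

theorem pvBuildMaps_eq (T : List (String × List String)) (rng : List Int) :
    pvBuildMaps T rng =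
      (rng.foldl (fun d j => PySem.Dict.modify d (PySem.List.pyGetD T j ("", [])).1 [] (· ++ [j])) PySem.Dict.empty,
       rng.foldl (fun d j => (PySem.List.pyGetD T j ("", [])).2.foldl (fun r v => PySem.Dict.modify r v [] (· ++ [j])) d) PySem.Dict.empty) :=
  foldl_pair_split
    (fun d j => PySem.Dict.modify d (PySem.List.pyGetD T j ("", [])).1 [] (· ++ [j]))
    (fun d j => (PySem.List.pyGetD T j ("", [])).2.foldl (fun r v => PySem.Dict.modify r v [] (· ++ [j])) d)
    rng PySem.Dict.empty PySem.Dict.empty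

theorem mem_writes_fold (T : List (String × List String)) :
    ∀ (l : List Int) (d : PySem.Dict String (List Int)) (v : String) (j : Int),
      j ∈ (l.foldl (fun d j => PySem.Dict.modify d (PySem.List.pyGetD T j ("", [])).1 [] (· ++ [j])) d).getD v []
        ↔ j ∈ d.getD v [] ∨ (j ∈ l ∧ pvW T j = v) := by
  intro l
  induction l with
  | nil => simp
  | cons c t ih =>
    intro d v j
    simp only [List.foldl_cons, ih, PySem.Dict.getD_modify, List.mem_cons]
    by_cases hv : v = pvW T c
    · simp only [pvW] at hv ⊢
      subst hv
      rw [if_pos rfl]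
      simp only [List.mem_append, List.mem_singleton]
      constructor
      · rintro ((h | rfl) | h)
        · exact Or.inl h
        · exact Or.inr ⟨Or.inl rfl, rfl⟩
        · exact Or.inr ⟨Or.inr h.1, h.2⟩
      · rintro (h | ⟨(rfl | h), hw⟩)
        · exact Or.inl (Or.inl h)
        · exact Or.inl (Or.inr rfl)
        · exact Or.inr ⟨h, hw⟩
    · simp only [pvW] at hv ⊢
      rw [if_neg hv]
      constructor
      · rintro (h | h)
        · exact Or.inl h
        · exact Or.inr ⟨Or.inr h.1, h.2⟩
      · rintro (h | ⟨(rfl | h), hw⟩)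
        · exact Or.inl h
        · exact absurd hw.symm hv
        · exact Or.inr ⟨h, hw⟩

theorem mem_reads_inner (j : Int) :
    ∀ (vs : List String) (d : PySem.Dict String (List Int)) (v : String) (j' : Int),
      j' ∈ (vs.foldl (fun r v => PySem.Dict.modify r v [] (· ++ [j])) d).getD v []
        ↔ j' ∈ d.getD v [] ∨ (v ∈ vs ∧ j' = j) := by
  intro vs
  induction vs with
  | nil => simp
  | cons c t ih =>
    intro d v j'
    simp only [List.foldl_cons, ih, PySem.Dict.getD_modify, List.mem_cons]
    by_cases hv : v = c
    · subst hv
      rw [if_pos rfl]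
      simp only [List.mem_append, List.mem_singleton]
      tauto
    · rw [if_neg hv]
      tauto

theorem mem_reads_fold (T : List (String × List String)) :
    ∀ (l : List Int) (d : PySem.Dict String (List Int)) (v : String) (j' : Int),
      j' ∈ (l.foldl (fun d j => (PySem.List.pyGetD T j ("", [])).2.foldl (fun r v => PySem.Dict.modify r v [] (· ++ [j])) d) d).getD v []
        ↔ j' ∈ d.getD v [] ∨ (j' ∈ l ∧ v ∈ pvR T j') := by
  intro l
  induction l with
  | nil => simp
  | cons c t ih =>
    intro d v j'
    simp only [List.foldl_cons, ih, mem_reads_inner, List.mem_cons, pvR]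
    constructor
    · rintro ((h | ⟨hm, rfl⟩) | h)
      · exact Or.inl h
      · exact Or.inr ⟨Or.inl rfl, hm⟩
      · exact Or.inr ⟨Or.inr h.1, h.2⟩
    · rintro (h | ⟨(rfl | h), hr⟩)
      · exact Or.inl (Or.inl h)
      · exact Or.inl (Or.inr ⟨hr, rfl⟩)
      · exact Or.inr ⟨h, hr⟩

theorem mem_pvBuildA (A : List String) (T : List (String × List String)) (rng : List Int) (x : String × String) :
    x ∈ pvBuildA A T rng ↔ ∃ i ∈ rng, ∃ j ∈ rng, depCondA A T i j x := by
  unfold pvBuildA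
  rw [mem_foldl_grow _ (fun i x => ∃ j ∈ rng, depCondA A T i j x) ?hf1 rng _ x]
  case hf1 =>
    intro s i y
    simp only []
    rw [mem_foldl_grow _ (fun j y => depCondA A T i j y) ?hf2 rng s y]
    case hf2 =>
      intro s' j y'
      unfold depCondA pvA pvW pvR
      split_ifs with h1 h2
      · simp only [PySem.Set.mem_add, h1]
        tauto
      · rcases h2 with h2 | h2
        · simp only [PySem.Set.mem_add, h1, h2]
          tauto
        · simp only [List.contains_iff_mem] at h2
          simp only [PySem.Set.mem_add, h1, h2]
          tauto
      · have hno : ¬ ((PySem.List.pyGetD T i ("", [])).1 = (PySem.List.pyGetD T j ("", [])).1 ∨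
            (PySem.List.pyGetD T i ("", [])).1 ∈ (PySem.List.pyGetD T j ("", [])).2) := by
          simpa using h2
        simp only [h1, hno]
        tauto
  simp [PySem.Set.empty]

theorem mem_pvBuildB (A : List String) (T : List (String × List String)) (rng : List Int) (x : String × String) :
    x ∈ pvBuildB A T rng ↔ ∃ i ∈ rng, depCondB A T rng i x := by
  unfold pvBuildB
  rw [pvBuildMaps_eq]
  simp only []
  rw [mem_foldl_grow _ (fun i x => depCondB A T rng i x) ?hf rng _ x]
  case hf =>
    intro s i y
    simp only []
    rw [mem_foldl_grow _ (fun j y => y = (pvA A i, pvA A j) ∨ y = (pvA A j, pvA A i)) ?hr _ _ y]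
    case hr =>
      intro s' j y'
      simp only [PySem.Set.mem_add, pvA]
      tauto
    rw [mem_foldl_grow _ (fun j y => y = (pvA A i, pvA A j) ∨ y = (pvA A j, pvA A i)) ?hw _ _ y]
    case hw =>
      intro s' j y'
      simp only [PySem.Set.mem_add, pvA]
      tauto
    simp only [mem_writes_fold, mem_reads_fold, PySem.Set.mem_add, PySem.Dict.getD_empty,
      List.not_mem_nil, false_or]
    unfold depCondB pvA pvW
    constructor
    · rintro (((h | h) | ⟨j, hj, hp⟩) | ⟨j, hj, hp⟩)
      · exact Or.inl h
      · exact Or.inr (Or.inl h)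
      · exact Or.inr (Or.inr ⟨j, Or.inl hj, hp⟩)
      · exact Or.inr (Or.inr ⟨j, Or.inr hj, hp⟩)
    · rintro (h | (h | ⟨j, (hj | hj), hp⟩))
      · exact Or.inl (Or.inl (Or.inl h))
      · exact Or.inl (Or.inl (Or.inr h))
      · exact Or.inl (Or.inr ⟨j, hj, hp⟩)
      · exact Or.inr ⟨j, hj, hp⟩
  simp [PySem.Set.empty]

-- the two characterisations describe the same set of pairs
theorem conds_iff (A : List String) (T : List (String × List String)) (rng : List Int) (x : String × String) :
    (∃ i ∈ rng, ∃ j ∈ rng, depCondA A T i j x) ↔ (∃ i ∈ rng, depCondB A T rng i x) := by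
  constructor
  · rintro ⟨i, hi, j, hj, (⟨rfl, hx⟩ | ⟨hne, (hw | hr), hp⟩)⟩
    · exact ⟨i, hi, Or.inl hx⟩
    · exact ⟨i, hi, Or.inr ⟨j, Or.inl ⟨hj, hw.symm⟩, hp⟩⟩
    · exact ⟨i, hi, Or.inr ⟨j, Or.inr ⟨hj, hr⟩, hp⟩⟩
  · rintro ⟨i, hi, (hx | ⟨j, (⟨hj, hw⟩ | ⟨hj, hr⟩), hp⟩)⟩
    · exact ⟨i, hi, i, hi, Or.inl ⟨rfl, hx⟩⟩
    · by_cases hij : i = j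
      · subst hij
        rcases hp with rfl | rfl <;> exact ⟨i, hi, i, hi, Or.inl ⟨rfl, rfl⟩⟩
      · exact ⟨i, hi, j, hj, Or.inr ⟨hij, Or.inl hw.symm, hp⟩⟩
    · by_cases hij : i = j
      · subst hij
        rcases hp with rfl | rfl <;> exact ⟨i, hi, i, hi, Or.inl ⟨rfl, rfl⟩⟩
      · exact ⟨i, hi, j, hj, Or.inr ⟨hij, Or.inr hr, hp⟩⟩

theorem nodup_pvBuildA (A : List String) (T : List (String × List String)) (rng : List Int) :
    (pvBuildA A T rng).Nodup := by
  unfold pvBuildA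
  apply nodup_foldl_grow _ ?_ rng _ List.nodup_nil
  intro s i hs
  apply nodup_foldl_grow _ ?_ rng s hs
  intro s' j hs'
  split_ifs
  · exact PySem.Set.nodup_add _ _ hs'
  · exact PySem.Set.nodup_add _ _ (PySem.Set.nodup_add _ _ hs')
  · exact hs'

theorem nodup_pvBuildB (A : List String) (T : List (String × List String)) (rng : List Int) :
    (pvBuildB A T rng).Nodup := by
  unfold pvBuildB
  apply nodup_foldl_grow _ ?_ rng _ List.nodup_nil
  intro s i hs
  apply nodup_foldl_grow _ ?_ _ _ ?_
  · intro s' j hs'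
    exact PySem.Set.nodup_add _ _ (PySem.Set.nodup_add _ _ hs')
  · apply nodup_foldl_grow _ ?_ _ _ ?_
    · intro s' j hs'
      exact PySem.Set.nodup_add _ _ (PySem.Set.nodup_add _ _ hs')
    · exact PySem.Set.nodup_add _ _ hs

theorem nodup_pvAllPairs (A : List String) : (pvAllPairs A).Nodup := by
  unfold pvAllPairs
  apply nodup_foldl_grow _ ?_ A _ List.nodup_nil
  intro s x hs
  apply nodup_foldl_grow _ ?_ A s hs
  intro s' y hs'
  exact PySem.Set.nodup_add _ _ hs'

theorem builds_perm (A : List String) (T : List (String × List String)) (rng : List Int) :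
    (pvBuildA A T rng).Perm (pvBuildB A T rng) := by
  rw [List.perm_ext_iff_of_nodup (nodup_pvBuildA A T rng) (nodup_pvBuildB A T rng)]
  intro x
  rw [mem_pvBuildA, mem_pvBuildB]
  exact conds_iff A T rng x

theorem ports_agree (A : List String) (T : List (String × List String)) (n : Int) :
    dependency_relationship A T n = dependency_relationship_alt A T n := by
  have hperm := builds_perm A T (PySem.List.pyRange 0 n 1)
  have hdiff : (PySem.Set.diff (pvAllPairs A) (pvBuildA A T (PySem.List.pyRange 0 n 1))).Perm
      (PySem.Set.diff (pvAllPairs A) (pvBuildB A T (PySem.List.pyRange 0 n 1))) := by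
    rw [List.perm_ext_iff_of_nodup
      (PySem.Set.nodup_diff _ _ (nodup_pvAllPairs A))
      (PySem.Set.nodup_diff _ _ (nodup_pvAllPairs A))]
    intro x
    rw [PySem.Set.mem_diff, PySem.Set.mem_diff, hperm.mem_iff]
  unfold dependency_relationship dependency_relationship_alt
  simp only []
  rw [sorted2_id_eq_of_perm _ _ hperm, sorted2_id_eq_of_perm _ _ hdiff]

-- ===== VERDICT (by name: the statement is the Claim_ definition above) =====
theorem dependency_relationship_spec : Claim_equal_dependency_relationship := by
  intro A T n _ _
  unfold Spec_dependency_relationship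
  exact ports_agree A T n
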